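-- pv_equiv track=rewrite | github.com/prestigeworldwidecr/CodeSignal | Exploring the Dimensions A Beginner's Guide to Multidimensional Arrays in Python/unit2/practice3.py | column_traverse
-- ===== SOURCE A (Python) =====
-- def column_traverse(matrix) :
-- # {
--     # rows, cols = len(matrix), len(matrix[0])
--     rows = len(matrix)
--     cols = len(matrix[0])
--
--     # row, col = rows - 1, cols - 1
--     current_row = rows - 1
--     current_col = cols - 1
--
--     direction = -1  # Start going upwards
--     output = []
--
--     for _ in range(rows * cols) :
--     # {
--         output.append(matrix[current_row][current_col])
--
--         # TODO: Implement logic to change direction and move left when hitting the top or bottom of the shelf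
--         if (current_row == 0 and direction == -1) or (current_row == rows - 1 and direction == 1) :
--         # {
--             direction = direction * -1
--             current_col = current_col - 1
--         # }
--
--         else :  # Otherwise, continue moving in the same direction
--         # {
--             current_row = current_row + direction
--         # }
--
--     # }
--
--     return output
-- ===== SOURCE B (Python) =====
-- def column_traverse(matrix):
--     cols = len(matrix[0])
--     output = []
--     up = True
--     for col in reversed(range(cols)):
--         column = [row[col] for row in matrix]
--         output.extend(reversed(column) if up else column)
--         up = not up
--     return output
-- ===== Notes on version B (the rewrite author's own statement) =====
-- stated objective: simpler
-- what changed: Replaced A's single flat loop over rows*cols steps driving a row/column/direction state machine by a nested traversal: for each column from right to left, extract the column and append it reversed or as-is according to an alternating direction flag.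
import Mathlib
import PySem

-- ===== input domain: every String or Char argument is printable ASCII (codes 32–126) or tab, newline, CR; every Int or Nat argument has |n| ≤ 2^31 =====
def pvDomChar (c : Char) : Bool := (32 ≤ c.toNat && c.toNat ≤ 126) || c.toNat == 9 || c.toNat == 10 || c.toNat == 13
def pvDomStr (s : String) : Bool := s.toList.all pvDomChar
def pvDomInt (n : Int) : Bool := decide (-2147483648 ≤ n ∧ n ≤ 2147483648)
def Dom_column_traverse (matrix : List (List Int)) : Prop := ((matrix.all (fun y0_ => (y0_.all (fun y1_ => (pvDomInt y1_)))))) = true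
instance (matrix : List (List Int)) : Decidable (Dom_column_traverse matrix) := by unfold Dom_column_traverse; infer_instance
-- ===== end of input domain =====

-- B replaces A's flat loop with its row/col/direction state machine by a nested
-- column-then-row traversal with an alternating direction flag (objective: simpler).

-- ===== PORT A =====
-- A-side helper: the body of A's 'for _ in range(rows*cols)' loop, one step of the state machine
def stepA (matrix : List (List Int)) (rows : Int) (st : Int × Int × Int × List Int) :
    Int × Int × Int × List Int :=
  let current_row := st.1
  let current_col := st.2.1
  let direction := st.2.2.1
  -- matrix[current_row][current_col]; indices are in range on Pre_, getD 0 only pads the total function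
  let output := st.2.2.2 ++ [(PySem.List.pyGet? ((PySem.List.pyGet? matrix current_row).getD []) current_col).getD 0]
  if (current_row = 0 ∧ direction = -1) ∨ (current_row = rows - 1 ∧ direction = 1) then
    (current_row, current_col - 1, direction * -1, output)
  else
    (current_row + direction, current_col, direction, output)

def column_traverse (matrix : List (List Int)) : List Int :=
  let rows : Int := matrix.length
  -- len(matrix[0]): raises on [], excluded by Pre_; getD [] only pads the total function
  let cols : Int := (((PySem.List.pyGet? matrix 0).getD []).length : Int)
  let final := (PySem.List.pyRange 0 (rows * cols) 1).foldl
    (fun st _ => stepA matrix rows st) (rows - 1, cols - 1, -1, ([] : List Int))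
  final.2.2.2

-- ===== PORT B =====
-- B-side helper: the body of B's 'for col in reversed(range(cols))' loop
def stepB (matrix : List (List Int)) (st : List Int × Bool) (col : Int) : List Int × Bool :=
  let column := matrix.map (fun row => (PySem.List.pyGet? row col).getD 0)
  (st.1 ++ (if st.2 then column.reverse else column), !st.2)

def column_traverse_alt (matrix : List (List Int)) : List Int :=
  let cols : Int := (((PySem.List.pyGet? matrix 0).getD []).length : Int)
  let final := ((PySem.List.pyRange 0 cols 1).reverse).foldl (stepB matrix) (([] : List Int), true)
  final.1

-- ===== PRECONDITION & SPEC =====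
-- Exactly where Python A returns: it reads matrix[0] (IndexError on []) and every entry
-- matrix[r][c] for c < len(matrix[0]), so every row must have at least len(matrix[0]) entries.
def Pre_column_traverse (matrix : List (List Int)) : Prop :=
  matrix ≠ [] ∧ ∀ row ∈ matrix, (matrix.headD []).length ≤ row.length
instance (matrix : List (List Int)) : Decidable (Pre_column_traverse matrix) := by
  unfold Pre_column_traverse; infer_instance

def pvWitness_column_traverse : List (List Int) := [[1, 2], [3, 4]]

def Spec_column_traverse (matrix : List (List Int)) (out : List Int) : Prop := out = column_traverse_alt matrix
instance (matrix : List (List Int)) (out : List Int) : Decidable (Spec_column_traverse matrix out) := by unfold Spec_column_traverse; infer_instance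

-- ===== CLAIM (what is proved, stated in full; the proofs are below) =====
def Claim_equal_column_traverse : Prop := ∀ (matrix : List (List Int)), Dom_column_traverse matrix → Pre_column_traverse matrix → Spec_column_traverse matrix (column_traverse matrix)

-- ===== LEMMAS AND PROOFS =====

-- the column extracted at index c (both programs read the same entries)
def colList (matrix : List (List Int)) (c : Int) : List Int :=
  matrix.map (fun row => (PySem.List.pyGet? row c).getD 0)

-- the snake output for k columns starting at column c, first column upwards iff up
def snakeD (matrix : List (List Int)) (c : Int) (k : Nat) (up : Bool) : List Int :=
  match k with
  | 0 => []
  | k + 1 =>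
      (if up then (colList matrix c).reverse else colList matrix c) ++
        snakeD matrix (c - 1) k (!up)

lemma foldl_ignore_eq_iterate {α β : Type} (f : α → α) (l : List β) (init : α) :
    l.foldl (fun s _ => f s) init = f^[l.length] init := by
  induction l generalizing init with
  | nil => rfl
  | cons x t ih => simp [List.foldl_cons, ih, Function.iterate_succ_apply]

lemma length_colList (matrix : List (List Int)) (c : Int) :
    (colList matrix c).length = matrix.length := by simp [colList]

lemma entry_eq (matrix : List (List Int)) (c : Int) (r : Nat) (hr : r < matrix.length) :
    (PySem.List.pyGet? ((PySem.List.pyGet? matrix (r : Int)).getD []) c).getD 0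
      = (colList matrix c).getD r 0 := by
  have h0 : (PySem.List.pyGet? matrix (r : Int)).getD [] = matrix[r] := by
    have h := PySem.List.pyGetD_eq_getElem (xs := matrix) (i := (r : Int)) (d := [])
      (by exact_mod_cast Nat.zero_le r) (by exact_mod_cast hr)
    simpa [PySem.List.pyGetD, PySem.List.pyGet?] using h
  rw [h0]
  simp [colList, List.getD_eq_getElem?_getD, List.getElem?_map,
    List.getElem?_eq_getElem hr]

-- up-block: starting at row r going up, r+1 steps emit column c from row r down to row 0
lemma up_block (matrix : List (List Int)) (c : Int) :
    ∀ (r : Nat), r < matrix.length → ∀ (out : List Int),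
      (stepA matrix (matrix.length : Int))^[r + 1] ((r : Int), c, -1, out)
        = (0, c - 1, 1, out ++ ((colList matrix c).take (r + 1)).reverse) := by
  intro r
  induction r with
  | zero =>
      intro hr out
      have hlt : 0 < (colList matrix c).length := by rw [length_colList]; omega
      have he := entry_eq matrix c 0 hr
      rw [List.getD_eq_getElem?_getD, List.getElem?_eq_getElem hlt] at he
      push_cast at he
      simp [stepA, he, List.take_add_one, List.getElem?_eq_getElem hlt]
  | succ r ih =>
      intro hr out
      rw [Function.iterate_succ_apply]
      have hstep : stepA matrix (matrix.length : Int) (((r + 1 : Nat) : Int), c, -1, out)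
          = ((r : Int), c, -1,
              out ++ [(PySem.List.pyGet? ((PySem.List.pyGet? matrix ((r + 1 : Nat) : Int)).getD []) c).getD 0]) := by
        simp only [stepA]
        rw [if_neg (by rintro (⟨h1, -⟩ | ⟨-, h2⟩)
                       · exact absurd h1 (by omega)
                       · exact absurd h2 (by norm_num))]
        norm_num
      rw [hstep, ih (by omega)]
      have hlt : r + 1 < (colList matrix c).length := by rw [length_colList]; omega
      have he := entry_eq matrix c (r + 1) hr
      push_cast at he
      simp [he, List.take_add_one, List.getElem?_eq_getElem hlt, List.getD_eq_getElem?_getD]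

-- down-block: starting j rows above the bottom going down, j+1 steps emit the rest of column c
lemma down_block (matrix : List (List Int)) (c : Int) :
    ∀ (j : Nat), j < matrix.length → ∀ (out : List Int),
      (stepA matrix (matrix.length : Int))^[j + 1] ((matrix.length : Int) - 1 - j, c, 1, out)
        = ((matrix.length : Int) - 1, c - 1, -1,
            out ++ (colList matrix c).drop (matrix.length - 1 - j)) := by
  intro j
  induction j with
  | zero =>
      intro hj out
      have hr : matrix.length - 1 < matrix.length := by omega
      have hlt : matrix.length - 1 < (colList matrix c).length := by
        rw [length_colList]; omega
      have he := entry_eq matrix c (matrix.length - 1) hr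
      rw [List.getD_eq_getElem?_getD, List.getElem?_eq_getElem hlt] at he
      rw [show ((matrix.length - 1 : Nat) : Int) = (matrix.length : Int) - 1 by omega] at he
      have hdrop : (colList matrix c).drop (matrix.length - 1)
          = [(colList matrix c)[matrix.length - 1]] := by
        rw [List.drop_eq_getElem_cons hlt,
          show matrix.length - 1 + 1 = (colList matrix c).length by rw [length_colList]; omega,
          List.drop_length]
      rw [show (0 : Nat) + 1 = 1 by rfl, Function.iterate_one,
        show (matrix.length : Int) - 1 - ((0 : Nat) : Int) = (matrix.length : Int) - 1 by omega,
        show matrix.length - 1 - 0 = matrix.length - 1 by omega]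
      simp only [stepA]
      rw [if_pos (by norm_num), he, hdrop]
      norm_num
  | succ j ih =>
      intro hj out
      rw [Function.iterate_succ_apply]
      have hrow : matrix.length - 2 - j < matrix.length := by omega
      have hstep : stepA matrix (matrix.length : Int)
            ((matrix.length : Int) - 1 - ((j + 1 : Nat) : Int), c, 1, out)
          = ((matrix.length : Int) - 1 - (j : Int), c, 1,
              out ++ [(PySem.List.pyGet? ((PySem.List.pyGet? matrix ((matrix.length : Int) - 1 - ((j + 1 : Nat) : Int))).getD []) c).getD 0]) := by
        simp only [stepA]
        rw [if_neg (by rintro (⟨-, h2⟩ | ⟨h1, -⟩)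
                       · exact absurd h2 (by norm_num)
                       · exact absurd h1 (by omega))]
        rw [show (matrix.length : Int) - 1 - ((j + 1 : Nat) : Int) + 1
            = (matrix.length : Int) - 1 - (j : Int) by push_cast; ring]
      rw [hstep, ih (by omega)]
      have hlt : matrix.length - 2 - j < (colList matrix c).length := by
        rw [length_colList]; omega
      have he := entry_eq matrix c (matrix.length - 2 - j) hrow
      rw [List.getD_eq_getElem?_getD, List.getElem?_eq_getElem hlt] at he
      rw [show ((matrix.length - 2 - j : Nat) : Int) = (matrix.length : Int) - 1 - ((j + 1 : Nat) : Int) by omega] at he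
      rw [he, show matrix.length - 1 - (j + 1) = matrix.length - 2 - j by omega,
        List.drop_eq_getElem_cons hlt,
        show matrix.length - 2 - j + 1 = matrix.length - 1 - j by omega]
      simp

-- packaged state at a column boundary
def stPack (matrix : List (List Int)) (up : Bool) (c : Int) (out : List Int) :
    Int × Int × Int × List Int :=
  if up then ((matrix.length : Int) - 1, c, -1, out) else (0, c, 1, out)

-- A's loop, run for k whole columns
lemma run_A (matrix : List (List Int)) (hm : 0 < matrix.length) :
    ∀ (k : Nat) (c : Int) (out : List Int) (up : Bool),
      (stepA matrix (matrix.length : Int))^[matrix.length * k] (stPack matrix up c out)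
        = stPack matrix (if k % 2 = 0 then up else !up) (c - k)
            (out ++ snakeD matrix c k up) := by
  intro k
  induction k with
  | zero => intro c out up; simp [snakeD]
  | succ k ih =>
      intro c out up
      rw [show matrix.length * (k + 1) = matrix.length * k + matrix.length by ring,
        Function.iterate_add_apply]
      have hblock : (stepA matrix (matrix.length : Int))^[matrix.length] (stPack matrix up c out)
          = stPack matrix (!up) (c - 1)
              (out ++ (if up then (colList matrix c).reverse else colList matrix c)) := by
        cases up with
        | true =>
            have h2 := up_block matrix c (matrix.length - 1) (by omega) out
            rw [show matrix.length - 1 + 1 = matrix.length by omega,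
              show ((matrix.length - 1 : Nat) : Int) = (matrix.length : Int) - 1 by omega,
              List.take_of_length_le (by rw [length_colList])] at h2
            simp [stPack, h2]
        | false =>
            have h2 := down_block matrix c (matrix.length - 1) (by omega) out
            rw [show (matrix.length : Int) - 1 - ((matrix.length - 1 : Nat) : Int) = 0 by omega,
              show matrix.length - 1 - (matrix.length - 1) = 0 by omega,
              show matrix.length - 1 + 1 = matrix.length by omega] at h2
            simp [stPack, h2]
      rw [hblock, ih]
      have hpar : (if k % 2 = 0 then !up else !(!up)) = (if (k + 1) % 2 = 0 then up else !up) := by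
        rcases Nat.even_or_odd k with h | h
        · have h0 : k % 2 = 0 := Nat.even_iff.mp h
          have h1 : (k + 1) % 2 = 1 := by omega
          simp [h0, h1]
        · have h0 : k % 2 = 1 := Nat.odd_iff.mp h
          have h1 : (k + 1) % 2 = 0 := by omega
          simp [h0, h1]
      rw [hpar, show c - 1 - (k : Int) = c - ((k : Nat) + 1 : Nat) by push_cast; ring]
      simp [snakeD]

-- B's loop over reversed(range(k)) produces the same snake
lemma run_B (matrix : List (List Int)) :
    ∀ (k : Nat) (out : List Int) (up : Bool),
      ((PySem.List.pyRange 0 (k : Int) 1).reverse).foldl (stepB matrix) (out, up)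
        = (out ++ snakeD matrix ((k : Int) - 1) k up, if k % 2 = 0 then up else !up) := by
  intro k
  induction k with
  | zero => intro out up; simp [snakeD]
  | succ k ih =>
      intro out up
      have hsplit : PySem.List.pyRange 0 ((k + 1 : Nat) : Int) 1
          = PySem.List.pyRange 0 (k : Int) 1 ++ [(k : Int)] := by
        have := PySem.List.pyRange_one_succ_right (a := 0) (b := (k : Int)) (by omega)
        rw [show ((k + 1 : Nat) : Int) = (k : Int) + 1 by push_cast; ring]
        exact this
      rw [hsplit, List.reverse_append, List.reverse_singleton, List.singleton_append,
        List.foldl_cons]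
      have hstep : stepB matrix (out, up) (k : Int)
          = (out ++ (if up then (colList matrix (k : Int)).reverse else colList matrix (k : Int)), !up) := by
        simp [stepB, colList]
      rw [hstep, ih]
      have hpar : (if k % 2 = 0 then !up else !(!up)) = (if (k + 1) % 2 = 0 then up else !up) := by
        rcases Nat.even_or_odd k with h | h
        · have h0 : k % 2 = 0 := Nat.even_iff.mp h
          have h1 : (k + 1) % 2 = 1 := by omega
          simp [h0, h1]
        · have h0 : k % 2 = 1 := Nat.odd_iff.mp h
          have h1 : (k + 1) % 2 = 0 := by omega
          simp [h0, h1]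
      rw [hpar]
      have hc : ((k + 1 : Nat) : Int) - 1 = (k : Int) := by push_cast; ring
      rw [hc]
      simp [snakeD]

-- ===== VERDICT (by name: the statement is the Claim_ definition above) =====
theorem column_traverse_spec : Claim_equal_column_traverse := by
  intro matrix _ hpre
  unfold Spec_column_traverse
  simp only [column_traverse, column_traverse_alt]
  have hm : 0 < matrix.length := by
    rcases hpre with ⟨hne, _⟩
    cases matrix with
    | nil => exact absurd rfl hne
    | cons h t => simp
  set colsN : Nat := ((PySem.List.pyGet? matrix 0).getD []).length with hcols
  have hlen : (PySem.List.pyRange 0 ((matrix.length : Int) * (colsN : Int)) 1).length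
      = matrix.length * colsN := by
    rw [PySem.List.length_pyRange_one]
    have : (matrix.length : Int) * (colsN : Int) - 0 = ((matrix.length * colsN : Nat) : Int) := by
      push_cast; ring
    rw [this, Int.toNat_natCast]
  rw [foldl_ignore_eq_iterate (stepA matrix (matrix.length : Int)), hlen]
  have hA := run_A matrix hm colsN ((colsN : Int) - 1) [] true
  have hB := run_B matrix colsN [] true
  rw [show stPack matrix true ((colsN : Int) - 1) []
      = ((matrix.length : Int) - 1, (colsN : Int) - 1, -1, ([] : List Int)) by simp [stPack]] at hA
  rw [hA, hB]
  cases h : colsN % 2 with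
  | zero => simp [stPack]
  | succ n => simp [stPack]
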